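-- pv_equiv track=rewrite | github.com/microsoft/azurelinux | .pipelines/prchecks/CveSpecFilePRCheck/CveSpecFilePRCheck.py | extract_spec_specific_diff
-- ===== SOURCE A (Python) =====
-- def extract_spec_specific_diff(diff_text, spec_file):
--     """Extract diff sections relevant to a specific spec file."""
--     lines = diff_text.split('\n')
--     spec_diff_lines = []
--     in_spec_diff = False
--
--     for line in lines:
--         if line.startswith('diff --git'):
--             in_spec_diff = spec_file in line
--         elif in_spec_diff:
--             spec_diff_lines.append(line)
--
--     return '\n'.join(spec_diff_lines)
-- ===== SOURCE B (Python) =====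
-- def extract_spec_specific_diff(diff_text, spec_file):
--     """Extract diff sections relevant to a specific spec file."""
--     lines = diff_text.split('\n')
--     # Pass 1: group the diff into (header, body_lines) sections.
--     groups = []
--     i, n = 0, len(lines)
--     while i < n:
--         if lines[i].startswith('diff --git'):
--             j = i + 1
--             while j < n and not lines[j].startswith('diff --git'):
--                 j += 1
--             groups.append((lines[i], lines[i + 1:j]))
--             i = j
--         else:
--             i += 1
--     # Pass 2: keep the bodies of the sections whose header mentions spec_file.
--     selected = [line for header, body in groups if spec_file in header for line in body]
--     return '\n'.join(selected)
-- ===== Notes on version B (the rewrite author's own statement) =====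
-- stated objective: alternative
-- what changed: Replaces the single flag-toggling scan with an explicit group-then-select decomposition: a grouping pass splits the diff into (header, body) sections, then a separate filtering pass collects the bodies whose header contains the spec file.
import Mathlib
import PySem

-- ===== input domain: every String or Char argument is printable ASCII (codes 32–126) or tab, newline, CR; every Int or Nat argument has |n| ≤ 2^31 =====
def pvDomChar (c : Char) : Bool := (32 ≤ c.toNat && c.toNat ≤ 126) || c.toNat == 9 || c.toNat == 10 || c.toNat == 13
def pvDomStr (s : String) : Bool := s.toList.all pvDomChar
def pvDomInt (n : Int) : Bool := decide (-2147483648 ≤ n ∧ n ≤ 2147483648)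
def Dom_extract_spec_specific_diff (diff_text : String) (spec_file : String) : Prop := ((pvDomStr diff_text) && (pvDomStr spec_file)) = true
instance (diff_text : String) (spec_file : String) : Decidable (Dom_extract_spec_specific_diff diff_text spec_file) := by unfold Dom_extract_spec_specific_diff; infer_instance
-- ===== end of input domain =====

-- B replaces A's flag-toggling single scan by an explicit group-then-select decomposition (same O(n) cost).

-- ===== PORT A =====
-- A: one scan with a boolean 'in_spec_diff' state, appending body lines while the flag is set.
def extract_spec_specific_diff (diff_text : String) (spec_file : String) : String :=
  let lines := (PySem.Str.split? diff_text "\n").getD []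
  let st := lines.foldl
    (fun (st : List String × Bool) line =>
      if PySem.Str.startswith line "diff --git" then
        (st.1, PySem.Str.isIn spec_file line)
      else if st.2 then
        (st.1 ++ [line], st.2)
      else st)
    ([], false)
  PySem.Str.join "\n" st.1

-- ===== PORT B =====
def pvHeader (l : String) : Bool := PySem.Str.startswith l "diff --git"

-- B's grouping pass (the outer while loop; the inner while loop that advances j over
-- non-header lines is the takeWhile/dropWhile split on the tail).
def pvGroups : List String → List (String × List String)
  | [] => []
  | l :: ls =>
    if pvHeader l then
      (l, ls.takeWhile (fun x => !pvHeader x)) :: pvGroups (ls.dropWhile (fun x => !pvHeader x))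
    else
      pvGroups ls
termination_by ls => ls.length
decreasing_by
  · have := List.length_dropWhile_le (fun x => !pvHeader x) ls
    simp only [List.length_cons]; omega
  · simp

def extract_spec_specific_diff_alt (diff_text : String) (spec_file : String) : String :=
  let lines := (PySem.Str.split? diff_text "\n").getD []
  let groups := pvGroups lines
  let selected := (groups.filter (fun g => PySem.Str.isIn spec_file g.1)).flatMap (fun g => g.2)
  PySem.Str.join "\n" selected

-- ===== PRECONDITION & SPEC =====
def Spec_extract_spec_specific_diff (diff_text : String) (spec_file : String) (out : String) : Prop := out = extract_spec_specific_diff_alt diff_text spec_file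
instance (diff_text : String) (spec_file : String) (out : String) : Decidable (Spec_extract_spec_specific_diff diff_text spec_file out) := by unfold Spec_extract_spec_specific_diff; infer_instance

-- ===== CLAIM (what is proved, stated in full; the proofs are below) =====
def Claim_equal_extract_spec_specific_diff : Prop := ∀ (diff_text : String) (spec_file : String), Dom_extract_spec_specific_diff diff_text spec_file → Spec_extract_spec_specific_diff diff_text spec_file (extract_spec_specific_diff diff_text spec_file)

-- ===== LEMMAS AND PROOFS =====

-- A's loop written as plain structural recursion on the line list.
def pvFuncA (spec : String) : List String → Bool → List String
  | [], _ => []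
  | l :: ls, flag =>
    if pvHeader l then pvFuncA spec ls (PySem.Str.isIn spec l)
    else if flag then l :: pvFuncA spec ls flag
    else pvFuncA spec ls flag

-- B's selection pass applied to a group list.
def pvCollect (spec : String) (gs : List (String × List String)) : List String :=
  (gs.filter (fun g => PySem.Str.isIn spec g.1)).flatMap (fun g => g.2)

theorem pvFoldA_eq (spec : String) (ls : List String) :
    ∀ (acc : List String) (flag : Bool),
    (ls.foldl
      (fun (st : List String × Bool) line =>
        if PySem.Str.startswith line "diff --git" then
          (st.1, PySem.Str.isIn spec line)
        else if st.2 then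
          (st.1 ++ [line], st.2)
        else st)
      (acc, flag)).1 = acc ++ pvFuncA spec ls flag := by
  induction ls with
  | nil => intro acc flag; simp [pvFuncA]
  | cons l ls ih =>
    intro acc flag
    simp only [List.foldl_cons, pvFuncA, pvHeader]
    by_cases h : PySem.Str.startswith l "diff --git"
    · simp only [h, if_true, ih]
    · by_cases hf : flag
      · subst hf
        simp only [h, if_false, Bool.false_eq_true, if_true, ih, List.append_assoc,
          List.singleton_append]
      · simp only [Bool.not_eq_true] at hf
        subst hf
        simp only [h, if_false, Bool.false_eq_true, ih]

theorem pvGroups_dropWhile (ls : List String) :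
    pvGroups (ls.dropWhile (fun x => !pvHeader x)) = pvGroups ls := by
  induction ls with
  | nil => simp
  | cons l ls ih =>
    by_cases h : pvHeader l
    · simp [h]
    · simp only [List.dropWhile_cons, h, Bool.not_false, if_true]
      rw [ih]
      conv_rhs => rw [pvGroups]
      simp [h]

theorem pvFuncA_eq_collect (spec : String) :
    ∀ (n : ℕ) (ls : List String), ls.length ≤ n → ∀ (flag : Bool),
    pvFuncA spec ls flag =
      (if flag then ls.takeWhile (fun x => !pvHeader x) else []) ++ pvCollect spec (pvGroups ls) := by
  intro n
  induction n with
  | zero =>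
    intro ls hls flag
    have : ls = [] := List.eq_nil_of_length_eq_zero (Nat.le_zero.mp hls)
    subst this
    simp [pvFuncA, pvGroups, pvCollect]
  | succ n ih =>
    intro ls hls flag
    cases ls with
    | nil => simp [pvFuncA, pvGroups, pvCollect]
    | cons l ls =>
      simp only [List.length_cons, Nat.succ_le_succ_iff] at hls
      by_cases h : pvHeader l
      · have hstep : pvFuncA spec (l :: ls) flag = pvFuncA spec ls (PySem.Str.isIn spec l) := by
          simp only [pvFuncA, h, if_true]
        rw [hstep, ih ls hls]
        have hg : pvGroups (l :: ls) =
            (l, ls.takeWhile (fun x => !pvHeader x)) :: pvGroups (ls.dropWhile (fun x => !pvHeader x)) := by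
          rw [pvGroups]; simp [h]
        rw [hg, pvGroups_dropWhile]
        by_cases hs : PySem.Str.isIn spec l
        all_goals simp only [PySem.Str.isIn_eq] at hs
        · simp [pvCollect, hs, h]
        · simp [pvCollect, hs, h]
      · have hg : pvGroups (l :: ls) = pvGroups ls := by rw [pvGroups]; simp [h]
        have htk : (l :: ls).takeWhile (fun x => !pvHeader x) =
            l :: ls.takeWhile (fun x => !pvHeader x) := by
          simp [h]
        by_cases hf : flag
        · subst hf
          have hstep : pvFuncA spec (l :: ls) true = l :: pvFuncA spec ls true := by
            simp only [pvFuncA, h, if_false, Bool.false_eq_true, if_true]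
          rw [hstep, ih ls hls, hg, htk]
          simp
        · simp only [Bool.not_eq_true] at hf
          subst hf
          have hstep : pvFuncA spec (l :: ls) false = pvFuncA spec ls false := by
            simp only [pvFuncA, h, if_false, Bool.false_eq_true]
          rw [hstep, ih ls hls, hg]
          simp

-- ===== VERDICT (by name: the statement is the Claim_ definition above) =====
theorem extract_spec_specific_diff_spec : Claim_equal_extract_spec_specific_diff := by
  intro diff_text spec_file _
  unfold Spec_extract_spec_specific_diff extract_spec_specific_diff extract_spec_specific_diff_alt
  have h1 := pvFoldA_eq spec_file ((PySem.Str.split? diff_text "\n").getD []) [] false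
  have h2 := pvFuncA_eq_collect spec_file ((PySem.Str.split? diff_text "\n").getD []).length
    ((PySem.Str.split? diff_text "\n").getD []) le_rfl false
  simp only [h1, h2, List.nil_append, if_false, Bool.false_eq_true, pvCollect]
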